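-- pv_equiv track=rewrite | github.com/koanatakiyo/BenchBench | scripts/knowledge_pipeline/stage1/reparse_raw_responses.py | _clean_terms_en
-- ===== SOURCE A (Python) =====
-- from typing import Dict, Any, Tuple, List, Set
--
-- EN_GENERIC_TERMS = {
--     'the circle',
--     'the volume',
--     'the base',
--     'the following',
--     'the emergency'
-- }
--
-- EN_MORPHOLOGY_MAP = {
--     'radiu': 'radius',
--     'triangle propertie': 'triangle properties',
--     'mensuration': 'solid geometry',
--     'solid geometry': 'solid geometry'
-- }
--
-- def _clean_terms_en(terms: List[str]) -> List[str]:
--     normalized: List[str] = []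
--     seen: Set[str] = set()
--
--     for term in terms:
--         if not isinstance(term, str):
--             continue
--         raw = term.strip()
--         if not raw:
--             continue
--         key = raw.lower()
--         mapped = EN_MORPHOLOGY_MAP.get(key, raw)
--         lower = mapped.lower()
--
--         if lower in EN_GENERIC_TERMS:
--             continue
--         if lower in seen:
--             continue
--
--         normalized.append(mapped)
--         seen.add(lower)
--
--     normalized = _prune_nested_phrases(normalized)
--     return normalized
--
-- def _prune_nested_phrases(terms: List[str]) -> List[str]:
--     result: List[str] = []
--     lowered = [t.lower() for t in terms]
--
--     for idx, term in enumerate(terms):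
--         lower = lowered[idx]
--         drop = False
--         if lower.endswith(' of') or lower.endswith(' of the'):
--             for j, other in enumerate(terms):
--                 if j == idx:
--                     continue
--                 other_lower = lowered[j]
--                 if other_lower.startswith(lower) and len(other_lower) > len(lower):
--                     remainder = other_lower[len(lower):].strip()
--                     if remainder:
--                         drop = True
--                         break
--         if not drop:
--             result.append(term)
--     return result
-- ===== SOURCE B (Python) =====
-- from typing import List
--
-- EN_GENERIC_TERMS = {
--     'the circle',
--     'the volume',
--     'the base',
--     'the following',
--     'the emergency'
-- }
--
-- EN_MORPHOLOGY_MAP = {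
--     'radiu': 'radius',
--     'triangle propertie': 'triangle properties',
--     'mensuration': 'solid geometry',
--     'solid geometry': 'solid geometry'
-- }
--
-- def _clean_terms_en(terms: List[str]) -> List[str]:
--     # Pass 1: normalize + dedupe (single merged-condition loop).
--     normalized: List[str] = []
--     seen = set()
--     for term in terms:
--         if not isinstance(term, str):
--             continue
--         raw = term.strip()
--         if not raw:
--             continue
--         mapped = EN_MORPHOLOGY_MAP.get(raw.lower(), raw)
--         low = mapped.lower()
--         if low in EN_GENERIC_TERMS or low in seen:
--             continue
--         normalized.append(mapped)
--         seen.add(low)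
--     # Pass 2: collect every proper prefix of a kept term that ends in
--     # ' of' / ' of the' into a drop set, then filter once. Because every
--     # kept term is stripped and non-empty, such a prefix is exactly a
--     # phrase the original pairwise scan would prune.
--     drop = set()
--     for t in normalized:
--         low = t.lower()
--         for i in range(1, len(low)):
--             p = low[:i]
--             if p.endswith(' of') or p.endswith(' of the'):
--                 drop.add(p)
--     return [t for t in normalized if t.lower() not in drop]
-- ===== Notes on version B (the rewrite author's own statement) =====
-- stated objective: alternative
-- what changed: The quadratic pairwise prune (for each ' of'-suffixed term, rescan all other terms for a longer extension) is replaced by one pass that collects every ' of'/' of the'-suffixed proper prefix of the kept lowercased terms into a drop set, followed by a single filter; the normalize/dedupe pass is kept as a single merged-condition loop.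
import Mathlib
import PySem

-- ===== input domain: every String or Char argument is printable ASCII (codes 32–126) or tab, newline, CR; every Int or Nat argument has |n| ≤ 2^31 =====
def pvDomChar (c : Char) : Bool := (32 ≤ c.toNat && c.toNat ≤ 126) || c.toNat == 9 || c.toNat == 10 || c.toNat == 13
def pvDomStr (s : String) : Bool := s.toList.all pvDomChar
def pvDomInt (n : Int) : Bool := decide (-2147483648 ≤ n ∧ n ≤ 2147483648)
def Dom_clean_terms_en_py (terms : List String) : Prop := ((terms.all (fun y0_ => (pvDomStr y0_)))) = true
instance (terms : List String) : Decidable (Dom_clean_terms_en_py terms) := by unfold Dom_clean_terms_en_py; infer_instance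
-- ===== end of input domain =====

-- B replaces A's quadratic pairwise prefix scan by a drop-set of every ' of'/' of the'-suffixed
-- proper prefix of the kept terms, collected in one pass (objective: alternative algorithm).

-- shared module constants
def pvGeneric : PySem.Set String :=
  PySem.Set.ofList ["the circle", "the volume", "the base", "the following", "the emergency"]
def pvMorph : PySem.Dict String String :=
  PySem.Dict.ofList [("radiu", "radius"), ("triangle propertie", "triangle properties"),
    ("mensuration", "solid geometry"), ("solid geometry", "solid geometry")]

-- ===== PORT A =====
-- inner 'drop' computation of _prune_nested_phrases (the for-j loop with break, as any)
def pvDropA (terms : List String) (lowered : List String) (idx : Int) : Bool :=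
  let lower := PySem.List.pyGetD lowered idx ""
  if PySem.Str.endswith lower " of" || PySem.Str.endswith lower " of the" then
    (PySem.List.enumerate terms 0).any (fun jt =>
      let other_lower := PySem.List.pyGetD lowered jt.1 ""
      decide (jt.1 ≠ idx) && PySem.Str.startswith other_lower lower
        && decide (PySem.Str.len lower < PySem.Str.len other_lower)
        && (PySem.Str.strip (PySem.Str.slice other_lower (some (PySem.Str.len lower)) none) != ""))
  else false

def pvPruneA (terms : List String) : List String :=
  let lowered := terms.map PySem.Str.lower
  (PySem.List.enumerate terms 0).foldl
    (fun result it => if !pvDropA terms lowered it.1 then result ++ [it.2] else result) []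

def pvNormalizeA (terms : List String) : List String × PySem.Set String :=
  terms.foldl (fun st term =>
    let raw := PySem.Str.strip term
    if raw = "" then st
    else
      let key := PySem.Str.lower raw
      let mapped := pvMorph.getD key raw
      let lower := PySem.Str.lower mapped
      if pvGeneric.contains lower then st
      else if PySem.Set.contains st.2 lower then st
      else (st.1 ++ [mapped], PySem.Set.add st.2 lower)) ([], PySem.Set.empty)

def clean_terms_en_py (terms : List String) : List String :=
  pvPruneA (pvNormalizeA terms).1

-- ===== PORT B =====
def pvNormalizeB (terms : List String) : List String × PySem.Set String :=
  terms.foldl (fun st term =>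
    let raw := PySem.Str.strip term
    if raw = "" then st
    else
      let mapped := pvMorph.getD (PySem.Str.lower raw) raw
      let low := PySem.Str.lower mapped
      if pvGeneric.contains low || PySem.Set.contains st.2 low then st
      else (st.1 ++ [mapped], PySem.Set.add st.2 low)) ([], PySem.Set.empty)

-- drop set: every proper prefix of a kept term's lowercase that ends in ' of' / ' of the'
def pvDropSet (normalized : List String) : PySem.Set String :=
  normalized.foldl (fun drop t =>
    let low := PySem.Str.lower t
    (PySem.List.pyRange 1 (PySem.Str.len low)).foldl (fun drop i =>
      let p := PySem.Str.slice low none (some i)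
      if PySem.Str.endswith p " of" || PySem.Str.endswith p " of the" then PySem.Set.add drop p
      else drop) drop) PySem.Set.empty

def clean_terms_en_py_alt (terms : List String) : List String :=
  let normalized := (pvNormalizeB terms).1
  let drop := pvDropSet normalized
  normalized.filter (fun t => !PySem.Set.contains drop (PySem.Str.lower t))

-- ===== PRECONDITION & SPEC =====
def Spec_clean_terms_en_py (terms : List String) (out : List String) : Prop := out = clean_terms_en_py_alt terms
instance (terms : List String) (out : List String) : Decidable (Spec_clean_terms_en_py terms out) := by unfold Spec_clean_terms_en_py; infer_instance

-- ===== CLAIM (what is proved, stated in full; the proofs are below) =====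
def Claim_equal_clean_terms_en_py : Prop := ∀ (terms : List String), Dom_clean_terms_en_py terms → Spec_clean_terms_en_py terms (clean_terms_en_py terms)

-- ===== LEMMAS AND PROOFS =====

-- a string is "good" when it is non-empty and its last character is not whitespace
def pvGoodB (l : List Char) : Bool :=
  match l.getLast? with
  | some c => !PySem.Chars.isspace c
  | none => false

def pvGood (t : String) : Prop := pvGoodB (PySem.Chars.lower t.toList) = true

lemma pvNormalize_eq (terms : List String) : pvNormalizeB terms = pvNormalizeA terms := by
  unfold pvNormalizeA pvNormalizeB
  apply PySem.List.foldl_congr_mem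
  intro st term _
  simp only []
  by_cases h1 : PySem.Str.strip term = ""
  · simp [h1]
  · simp only [h1, if_false]
    split_ifs <;> simp_all

lemma char_toNat_ofNat (n : Nat) (h : n.isValidChar) : (Char.ofNat n).toNat = n := by
  unfold Char.ofNat Char.ofNatAux
  simp [h]

lemma isspace_lowerChar (c : Char) : PySem.Chars.isspace (PySem.Chars.lowerChar c) = PySem.Chars.isspace c := by
  unfold PySem.Chars.lowerChar
  split
  · rename_i hu
    unfold PySem.Chars.isupper at hu
    simp only [Bool.and_eq_true, decide_eq_true_eq] at hu
    have hA : 65 ≤ c.toNat := hu.1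
    have hZ : c.toNat ≤ 90 := hu.2
    have ht : (Char.ofNat (c.toNat + 32)).toNat = c.toNat + 32 :=
      char_toNat_ofNat _ (Or.inl (by omega))
    unfold PySem.Chars.isspace
    simp only [ht]
    rw [Bool.eq_iff_iff]
    simp only [Bool.or_eq_true, Bool.and_eq_true, decide_eq_true_eq]
    omega
  · rfl

lemma goodB_lower (l : List Char) : pvGoodB (PySem.Chars.lower l) = pvGoodB l := by
  unfold pvGoodB PySem.Chars.lower
  rw [List.getLast?_map]
  cases h : l.getLast? <;> simp [isspace_lowerChar]

lemma goodB_ne_nil (l : List Char) (h : pvGoodB l = true) : l ≠ [] := by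
  intro h0; rw [h0] at h; simp [pvGoodB] at h

lemma goodB_strip (l : List Char) (h : PySem.Chars.strip l ≠ []) : pvGoodB (PySem.Chars.strip l) = true := by
  unfold PySem.Chars.strip PySem.Chars.rstrip at h ⊢
  set r := List.dropWhile PySem.Chars.isspace (PySem.Chars.lstrip l).reverse with hr
  have hrne : r ≠ [] := by
    intro h0; exact h (by rw [h0]; rfl)
  unfold pvGoodB
  rw [List.getLast?_reverse]
  rw [List.head?_eq_some_head hrne]
  have := List.head_dropWhile_not PySem.Chars.isspace (hr ▸ hrne)
  simp only [← hr] at this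
  simp [this]

lemma strip_ne_nil_of_goodB (l : List Char) (h : pvGoodB l = true) : PySem.Chars.strip l ≠ [] := by
  obtain ⟨c, hc, hs⟩ : ∃ c, l.getLast? = some c ∧ PySem.Chars.isspace c = false := by
    unfold pvGoodB at h
    cases hg : l.getLast? with
    | none => rw [hg] at h; simp at h
    | some c => rw [hg] at h; exact ⟨c, rfl, by simpa using h⟩
  intro h0
  unfold PySem.Chars.strip PySem.Chars.rstrip at h0
  have h1 : List.dropWhile PySem.Chars.isspace (PySem.Chars.lstrip l).reverse = [] := by
    simpa using h0
  rw [List.dropWhile_eq_nil_iff] at h1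
  have hall : ∀ x ∈ l, PySem.Chars.isspace x = true := by
    intro x hx
    rcases (List.mem_append.mp ((List.takeWhile_append_dropWhile (p := PySem.Chars.isspace) (l := l)) ▸ hx)) with h2 | h2
    · exact List.mem_takeWhile_imp h2
    · exact h1 x (List.mem_reverse.mpr h2)
  have := hall c (List.mem_of_getLast? hc)
  rw [this] at hs; exact Bool.noConfusion hs

lemma getLast?_drop_of_lt {α : Type} (l : List α) (n : Nat) (h : n < l.length) :
    (l.drop n).getLast? = l.getLast? := by
  induction l generalizing n with
  | nil => simp at h
  | cons a t ih =>
      cases n with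
      | zero => simp
      | succ m =>
          simp only [List.length_cons, Nat.add_lt_add_iff_right] at h
          simp only [List.drop_succ_cons]
          rw [ih m h]
          cases t with
          | nil => simp at h
          | cons b u => simp

lemma toList_ne_nil_of_ne_empty (s : String) (h : s ≠ "") : s.toList ≠ [] := by
  intro h0
  exact h (String.toList_inj.mp (by simp [h0]))

lemma ne_empty_of_toList_ne_nil (s : String) (h : s.toList ≠ []) : s ≠ "" := by
  intro h0
  rw [h0] at h
  exact h rfl

lemma pvGood_strip (s : String) (h : PySem.Str.strip s ≠ "") : pvGood (PySem.Str.strip s) := by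
  unfold pvGood
  rw [PySem.Str.toList_strip, goodB_lower]
  apply goodB_strip
  have := toList_ne_nil_of_ne_empty _ h
  rwa [PySem.Str.toList_strip] at this

lemma pvGood_getD (key raw : String) (h : pvGood raw) : pvGood (pvMorph.getD key raw) := by
  unfold PySem.Dict.getD
  cases hg : pvMorph.get? key with
  | none => simpa using h
  | some v =>
      have hv : v ∈ pvMorph.items.map (fun p => p.2) := by
        unfold PySem.Dict.get? at hg
        rcases Option.map_eq_some_iff.mp hg with ⟨p, hp, rfl⟩
        exact List.mem_map_of_mem (List.mem_of_find?_eq_some hp)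
      have hitems : pvMorph.items.map (fun p => p.2) =
          ["radius", "triangle properties", "solid geometry", "solid geometry"] := by decide
      rw [hitems] at hv
      simp only [Option.getD_some]
      fin_cases hv <;> (unfold pvGood; decide)

lemma pvNormalizeA_good (terms : List String) : ∀ t ∈ (pvNormalizeA terms).1, pvGood t := by
  unfold pvNormalizeA
  have aux : ∀ (ts : List String) (st : List String × PySem.Set String),
      (∀ t ∈ st.1, pvGood t) →
      ∀ t ∈ (ts.foldl (fun st term =>
        let raw := PySem.Str.strip term
        if raw = "" then st
        else
          let key := PySem.Str.lower raw
          let mapped := pvMorph.getD key raw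
          let lower := PySem.Str.lower mapped
          if pvGeneric.contains lower then st
          else if PySem.Set.contains st.2 lower then st
          else (st.1 ++ [mapped], PySem.Set.add st.2 lower)) st).1, pvGood t := by
    intro ts
    induction ts with
    | nil => intro st h; exact h
    | cons a tl ih =>
        intro st h
        rw [List.foldl_cons]
        apply ih
        simp only []
        by_cases h1 : PySem.Str.strip a = ""
        · simpa [h1] using h
        · simp only [h1, if_false]
          split_ifs with h2 h3
          · exact h
          · exact h
          · intro t ht
            rcases List.mem_append.mp ht with ht | ht
            · exact h t ht
            · rw [List.mem_singleton.mp ht]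
              exact pvGood_getD _ _ (pvGood_strip a h1)
  exact aux terms ([], PySem.Set.empty) (by simp)

lemma mem_foldl_addIf {β : Type} (l : List β) (c : β → Bool) (g : β → String)
    (s : PySem.Set String) (x : String) :
    x ∈ l.foldl (fun s e => if c e then PySem.Set.add s (g e) else s) s ↔
      x ∈ s ∨ ∃ e ∈ l, c e = true ∧ x = g e := by
  induction l generalizing s with
  | nil => simp
  | cons e tl ih =>
      rw [List.foldl_cons, ih]
      by_cases hc : c e <;> simp [hc, PySem.Set.mem_add] <;> tauto

lemma mem_pvDropSet (L : List String) (x : String) :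
    x ∈ pvDropSet L ↔ ∃ t ∈ L, ∃ i : Int, 1 ≤ i ∧ i < PySem.Str.len (PySem.Str.lower t) ∧
      (PySem.Str.endswith (PySem.Str.slice (PySem.Str.lower t) none (some i)) " of"
        || PySem.Str.endswith (PySem.Str.slice (PySem.Str.lower t) none (some i)) " of the") = true ∧
      x = PySem.Str.slice (PySem.Str.lower t) none (some i) := by
  have aux : ∀ (M : List String) (s : PySem.Set String),
      x ∈ M.foldl (fun drop t =>
        (PySem.List.pyRange 1 (PySem.Str.len (PySem.Str.lower t))).foldl (fun drop i =>
          if PySem.Str.endswith (PySem.Str.slice (PySem.Str.lower t) none (some i)) " of"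
            || PySem.Str.endswith (PySem.Str.slice (PySem.Str.lower t) none (some i)) " of the"
          then PySem.Set.add drop (PySem.Str.slice (PySem.Str.lower t) none (some i))
          else drop) drop) s ↔
      x ∈ s ∨ ∃ t ∈ M, ∃ i : Int, i ∈ PySem.List.pyRange 1 (PySem.Str.len (PySem.Str.lower t)) ∧
        (PySem.Str.endswith (PySem.Str.slice (PySem.Str.lower t) none (some i)) " of"
          || PySem.Str.endswith (PySem.Str.slice (PySem.Str.lower t) none (some i)) " of the") = true ∧
        x = PySem.Str.slice (PySem.Str.lower t) none (some i) := by
    intro M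
    induction M with
    | nil => simp
    | cons t tl ih =>
        intro s
        rw [List.foldl_cons, ih, mem_foldl_addIf]
        simp only [List.mem_cons]
        constructor
        · rintro (⟨h | ⟨i, hi, hc, he⟩⟩ | h)
          · exact Or.inl h
          · exact Or.inr ⟨t, Or.inl rfl, i, hi, hc, he⟩
          · rcases h with ⟨t', ht', rest⟩; exact Or.inr ⟨t', Or.inr ht', rest⟩
        · rintro (h | ⟨t', (rfl | ht'), rest⟩)
          · exact Or.inl (Or.inl h)
          · exact Or.inl (Or.inr rest)
          · exact Or.inr ⟨t', ht', rest⟩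
  unfold pvDropSet
  simp only []
  rw [aux]
  simp only [PySem.List.mem_pyRange_one]
  constructor
  · rintro (h | ⟨t, ht, i, ⟨h1, h2⟩, rest⟩)
    · simp [PySem.Set.empty] at h
    · exact ⟨t, ht, i, h1, h2, rest⟩
  · rintro ⟨t, ht, i, h1, h2, rest⟩
    exact Or.inr ⟨t, ht, i, ⟨h1, h2⟩, rest⟩

lemma pvDropA_iff (L : List String) (hL : ∀ t ∈ L, pvGood t) (k : Nat) (hk : k < L.length) :
    pvDropA L (L.map PySem.Str.lower) (k : Int) = PySem.Set.contains (pvDropSet L) (PySem.Str.lower L[k]) := by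
  have hgoodk : pvGoodB (PySem.Str.lower L[k]).toList = true := by
    rw [PySem.Str.toList_lower]; exact hL _ (List.getElem_mem hk)
  have hgetk : PySem.List.pyGetD (L.map PySem.Str.lower) (k : Int) "" = PySem.Str.lower L[k] := by
    rw [PySem.List.pyGetD_natCast, List.getD_eq_getElem _ _ (by simpa using hk), List.getElem_map]
  unfold pvDropA
  simp only [hgetk]
  rw [Bool.eq_iff_iff]
  unfold PySem.Set.contains
  rw [List.contains_iff_mem, mem_pvDropSet]
  by_cases hend : (PySem.Str.endswith (PySem.Str.lower L[k]) " of"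
      || PySem.Str.endswith (PySem.Str.lower L[k]) " of the") = true
  · rw [if_pos hend, List.any_eq_true]
    constructor
    · rintro ⟨jt, hjt, hcond⟩
      obtain ⟨j, hj, rfl⟩ := (PySem.List.mem_enumerate_iff _ _ _).mp hjt
      simp only [zero_add] at hcond
      rw [PySem.List.pyGetD_natCast, List.getD_eq_getElem _ _ (by simpa using hj),
        List.getElem_map] at hcond
      simp only [Bool.and_eq_true, decide_eq_true_eq, bne_iff_ne] at hcond
      obtain ⟨⟨⟨hne, hpre⟩, hlen⟩, hrem⟩ := hcond
      rw [PySem.Str.startswith_eq] at hpre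
      have hp : (PySem.Str.lower L[k]).toList <+: (PySem.Str.lower L[j]).toList :=
        (PySem.Chars.startswith_iff _ _).mp hpre
      have hslice : PySem.Str.slice (PySem.Str.lower L[j]) none
          (some (PySem.Str.len (PySem.Str.lower L[k]))) = PySem.Str.lower L[k] := by
        apply String.toList_inj.mp
        rw [PySem.Str.toList_slice, PySem.Chars.slice_eq_listSlice, PySem.Str.len_eq,
          PySem.List.slice_to _ (by positivity), Int.toNat_natCast]
        exact (List.prefix_iff_eq_take.mp hp).symm
      refine ⟨L[j], List.getElem_mem hj, PySem.Str.len (PySem.Str.lower L[k]), ?_, ?_, ?_, ?_⟩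
      · rw [PySem.Str.len_eq]
        have := List.length_pos_iff.mpr (goodB_ne_nil _ hgoodk)
        omega
      · exact hlen
      · rw [hslice]; exact hend
      · exact hslice.symm
    · rintro ⟨t, ht, i, h1, h2, hcpat, hxeq⟩
      obtain ⟨j, hj, rfl⟩ := List.mem_iff_getElem.mp ht
      refine ⟨(0 + (j : Int), L[j]), (PySem.List.mem_enumerate_iff _ _ _).mpr ⟨j, hj, rfl⟩, ?_⟩
      simp only [zero_add]
      rw [PySem.List.pyGetD_natCast, List.getD_eq_getElem _ _ (by simpa using hj), List.getElem_map]
      have h0i : (0 : Int) ≤ i := by omega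
      have hvg : pvGoodB (PySem.Str.lower L[j]).toList = true := by
        rw [PySem.Str.toList_lower]; exact hL _ (List.getElem_mem hj)
      have hlenv : i < ((PySem.Str.lower L[j]).toList.length : Int) := by
        rw [← PySem.Str.len_eq]; exact h2
      have hiN : i.toNat < (PySem.Str.lower L[j]).toList.length := by omega
      have hulist2 : (PySem.Str.lower L[k]).toList = List.take i.toNat (PySem.Str.lower L[j]).toList := by
        rw [hxeq, PySem.Str.toList_slice, PySem.Chars.slice_eq_listSlice, PySem.List.slice_to _ h0i]
      have hulen : (PySem.Str.lower L[k]).toList.length = i.toNat := by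
        rw [hulist2, List.length_take]; omega
      have hlenu : PySem.Str.len (PySem.Str.lower L[k]) = i := by
        rw [PySem.Str.len_eq, hulen]; omega
      simp only [Bool.and_eq_true, decide_eq_true_eq, bne_iff_ne]
      refine ⟨⟨⟨?_, ?_⟩, ?_⟩, ?_⟩
      · intro he
        have hjk : j = k := by exact_mod_cast he
        subst hjk
        omega
      · rw [PySem.Str.startswith_eq]
        apply (PySem.Chars.startswith_iff _ _).mpr
        rw [hulist2]
        exact List.take_prefix _ _
      · rw [hlenu, PySem.Str.len_eq]; omega
      · rw [hlenu]
        apply ne_empty_of_toList_ne_nil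
        rw [PySem.Str.toList_strip]
        apply strip_ne_nil_of_goodB
        have hgdrop : pvGoodB (List.drop i.toNat (PySem.Str.lower L[j]).toList) =
            pvGoodB (PySem.Str.lower L[j]).toList := by
          unfold pvGoodB
          rw [getLast?_drop_of_lt _ _ hiN]
        rw [PySem.Str.toList_slice, PySem.Chars.slice_eq_listSlice, PySem.List.slice_from _ h0i,
          hgdrop]
        exact hvg
  · rw [if_neg hend]
    constructor
    · intro h; exact absurd h (by simp)
    · rintro ⟨t, ht, i, h1, h2, hcpat, hxeq⟩
      exact absurd (hxeq ▸ hcpat) hend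

lemma map_snd_filter_enum (L : List String) (q : String → Bool) :
    List.map (fun it : Int × String => it.2)
      (List.filter (fun it : Int × String => q it.2) (PySem.List.enumerate L 0)) = L.filter q := by
  rw [show (fun it : Int × String => q it.2) = (q ∘ (fun it : Int × String => it.2)) from rfl,
    ← List.filter_map, PySem.List.map_snd_enumerate]

lemma pvPruneA_eq (L : List String) (hL : ∀ t ∈ L, pvGood t) :
    pvPruneA L = L.filter (fun t => !PySem.Set.contains (pvDropSet L) (PySem.Str.lower t)) := by
  unfold pvPruneA
  simp only []
  rw [PySem.List.foldl_append_if (p := fun it : Int × String => !pvDropA L (L.map PySem.Str.lower) it.1)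
    (f := fun it : Int × String => it.2), List.nil_append]
  rw [List.filter_congr (q := fun it : Int × String =>
    !PySem.Set.contains (pvDropSet L) (PySem.Str.lower it.2)) ?_]
  · exact map_snd_filter_enum L (fun t => !PySem.Set.contains (pvDropSet L) (PySem.Str.lower t))
  · intro it hit
    obtain ⟨j, hj, rfl⟩ := (PySem.List.mem_enumerate_iff _ _ _).mp hit
    simp only []
    rw [show ((0 : Int) + (j : Int)) = (j : Int) from zero_add _, pvDropA_iff L hL j hj]

-- ===== VERDICT (by name: the statement is the Claim_ definition above) =====
theorem clean_terms_en_py_spec : Claim_equal_clean_terms_en_py := by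
  intro terms _
  unfold Spec_clean_terms_en_py clean_terms_en_py clean_terms_en_py_alt
  rw [pvNormalize_eq]
  exact pvPruneA_eq _ (pvNormalizeA_good terms)
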